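-- pv_equiv track=rewrite | github.com/pasmargo/t2t-qa | linguistics/similarity_align.py | invert_alignments
-- ===== SOURCE A (Python) =====
-- from collections import defaultdict
--
-- def invert_alignments(alignment):
--   """
--   @alignment is a dictionary that maps a source word index
--   into a list of target word indices.
--   This function returns the inverted index.
--   """
--   inverted = defaultdict(list)
--   for src_i, trg_is in alignment.items():
--     for trg_i in trg_is:
--       inverted[trg_i].append(src_i)
--   for trg_i, src_is in inverted.items():
--     inverted[trg_i] = sorted(src_is)
--   return inverted
-- ===== SOURCE B (Python) =====
-- from collections import defaultdict
--
-- def invert_alignments(alignment):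
--   """
--   Inverted index: maps each target word index to the sorted list of
--   source word indices aligned to it.  Each bucket is kept sorted while
--   it is built (binary insertion), so the whole index is ready after a
--   single pass over the alignment.
--   """
--   inverted = defaultdict(list)
--   for src_i, trg_is in alignment.items():
--     for trg_i in trg_is:
--       bucket = inverted[trg_i]
--       lo, hi = 0, len(bucket)
--       while lo < hi:
--         mid = (lo + hi) // 2
--         if bucket[mid] <= src_i:
--           lo = mid + 1
--         else:
--           hi = mid
--       bucket.insert(lo, src_i)
--   return inverted
-- ===== Notes on version B (the rewrite author's own statement) =====
-- stated objective: alternative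
-- what changed: B builds each bucket already sorted by binary insertion during the single pass over the alignment, instead of A's append-everything pass followed by a second pass that sorts every bucket.
import Mathlib
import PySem

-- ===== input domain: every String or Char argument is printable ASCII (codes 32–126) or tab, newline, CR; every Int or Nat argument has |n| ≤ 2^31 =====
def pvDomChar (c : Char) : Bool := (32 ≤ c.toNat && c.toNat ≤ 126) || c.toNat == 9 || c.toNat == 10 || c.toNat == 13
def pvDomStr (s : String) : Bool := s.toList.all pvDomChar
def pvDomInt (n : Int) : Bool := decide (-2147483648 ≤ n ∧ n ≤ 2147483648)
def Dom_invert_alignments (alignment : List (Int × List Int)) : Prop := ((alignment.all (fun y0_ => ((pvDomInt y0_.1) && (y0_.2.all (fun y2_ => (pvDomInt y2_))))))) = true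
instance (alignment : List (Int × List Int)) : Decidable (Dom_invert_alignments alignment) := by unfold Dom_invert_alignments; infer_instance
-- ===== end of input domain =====

-- B keeps every bucket sorted while it is built (binary insertion in one pass),
-- instead of A's append-everything pass followed by a pass sorting each bucket
-- (objective: alternative decomposition).

-- ===== PORT A =====
def invert_alignments (alignment : List (Int × List Int)) : List (Int × List Int) :=
  -- for src_i, trg_is in alignment.items(): for trg_i in trg_is: inverted[trg_i].append(src_i)
  let inverted : PySem.Dict Int (List Int) :=
    alignment.foldl (fun d p =>
      p.2.foldl (fun d t => d.modify t [] (fun v => v ++ [p.1])) d) PySem.Dict.empty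
  -- for trg_i, src_is in inverted.items(): inverted[trg_i] = sorted(src_is)
  let inverted2 : PySem.Dict Int (List Int) :=
    inverted.items.foldl
      (fun d q => d.insert q.1 (PySem.List.sorted q.2 (fun x => x) false)) inverted
  inverted2.items

-- ===== PORT B =====
-- the while loop: lo, hi = 0, len(bucket); while lo < hi: …
-- bucket[mid] is always in range here (0 ≤ lo ≤ mid < hi ≤ len(bucket)), so getD is exact
def pvBisect (bucket : List Int) (x : Int) (lo hi : Nat) : Nat :=
  if _h : lo < hi then
    let mid := (lo + hi) / 2
    if bucket.getD mid 0 ≤ x then pvBisect bucket x (mid + 1) hi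
    else pvBisect bucket x lo mid
  else lo
termination_by hi - lo
decreasing_by all_goals omega

def invert_alignments_alt (alignment : List (Int × List Int)) : List (Int × List Int) :=
  -- for src_i, trg_is in alignment.items(): for trg_i in trg_is:
  --   bucket = inverted[trg_i]; (binary search for lo); bucket.insert(lo, src_i)
  let inverted : PySem.Dict Int (List Int) :=
    alignment.foldl (fun d p =>
      p.2.foldl (fun d t =>
        d.modify t [] (fun bucket =>
          PySem.List.insert bucket ((pvBisect bucket p.1 0 bucket.length : Nat) : Int) p.1)) d)
      PySem.Dict.empty
  inverted.items

-- ===== PRECONDITION & SPEC =====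
def Spec_invert_alignments (alignment : List (Int × List Int)) (out : List (Int × List Int)) : Prop := out = invert_alignments_alt alignment
instance (alignment : List (Int × List Int)) (out : List (Int × List Int)) : Decidable (Spec_invert_alignments alignment out) := by unfold Spec_invert_alignments; infer_instance

-- ===== CLAIM (what is proved, stated in full; the proofs are below) =====
def Claim_equal_invert_alignments : Prop := ∀ (alignment : List (Int × List Int)), Dom_invert_alignments alignment → Spec_invert_alignments alignment (invert_alignments alignment)

-- ===== LEMMAS AND PROOFS =====

/-- A dict whose items are `ks` keyed with values given by the function `g`. -/
def shapeD (ks : List Int) (g : Int → List Int) : PySem.Dict Int (List Int) :=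
  PySem.Dict.mk (ks.map fun t => (t, g t))

/-- All sources aligned (with multiplicity) to target `t`, in the order of `l`. -/
def collect (l : List (Int × List Int)) (t : Int) : List Int :=
  l.flatMap (fun q => (q.2.filter (fun u => u == t)).map (fun _ => q.1))

theorem get?_shapeD (ks : List Int) (g : Int → List Int) (k : Int) :
    (shapeD ks g).get? k = if k ∈ ks then some (g k) else none := by
  induction ks with
  | nil => simp [shapeD, PySem.Dict.get?]
  | cons a ks ih =>
    by_cases h : a = k
    · subst h; simp [shapeD, PySem.Dict.get?_mk_cons]
    · simpa [shapeD, PySem.Dict.get?_mk_cons, h, Ne.symm h] using ih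

theorem contains_shapeD (ks : List Int) (g : Int → List Int) (k : Int) :
    (shapeD ks g).contains k = decide (k ∈ ks) := by
  rw [PySem.Dict.contains_eq_isSome_get?, get?_shapeD]
  by_cases h : k ∈ ks <;> simp [h]

theorem insert_shapeD_mem (ks : List Int) (g : Int → List Int) {k : Int} (v : List Int)
    (h : k ∈ ks) :
    (shapeD ks g).insert k v = shapeD ks (fun t => if t = k then v else g t) := by
  unfold PySem.Dict.insert
  rw [contains_shapeD]
  simp only [h, decide_true, if_true]
  unfold shapeD
  congr 1
  simp only [List.map_map]
  apply List.map_congr_left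
  intro t _
  by_cases ht : t = k
  · subst ht; simp
  · simp [Function.comp, ht]

theorem insert_shapeD_not_mem (ks : List Int) (g : Int → List Int) {k : Int} (v : List Int)
    (h : k ∉ ks) :
    (shapeD ks g).insert k v = shapeD (ks ++ [k]) (fun t => if t = k then v else g t) := by
  unfold PySem.Dict.insert
  rw [contains_shapeD]
  simp only [h, decide_false, Bool.false_eq_true, if_false]
  unfold shapeD
  congr 1
  simp only [List.map_append, List.map_cons, List.map_nil]
  congr 1
  apply List.map_congr_left
  intro t ht
  have : t ≠ k := fun he => h (he ▸ ht)
  simp [this]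

theorem shapeD_congr {ks : List Int} {g g' : Int → List Int}
    (h : ∀ t ∈ ks, g t = g' t) : shapeD ks g = shapeD ks g' := by
  unfold shapeD
  congr 1
  exact List.map_congr_left (fun t ht => by rw [h t ht])

theorem modify_shapeD (ks : List Int) (g : Int → List Int) (k : Int)
    (f : List Int → List Int) :
    (shapeD ks g).modify k [] f
      = shapeD (PySem.Set.add ks k)
          (fun t => if t = k then f (if k ∈ ks then g k else []) else g t) := by
  unfold PySem.Dict.modify PySem.Dict.getD
  rw [get?_shapeD]
  have hadd : PySem.Set.add ks k = if k ∈ ks then ks else ks ++ [k] := by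
    simp only [PySem.Set.add, PySem.Set.contains]
    by_cases h : k ∈ ks <;> simp [h]
  by_cases h : k ∈ ks
  · rw [if_pos h, Option.getD_some, insert_shapeD_mem ks g _ h, hadd, if_pos h]
    apply shapeD_congr
    intro t _
    by_cases ht : t = k <;> simp [ht, h]
  · rw [if_neg h, Option.getD_none, insert_shapeD_not_mem ks g _ h, hadd, if_neg h]
    apply shapeD_congr
    intro t _
    by_cases ht : t = k <;> simp [ht, h]

theorem mem_foldl_add (ts : List Int) : ∀ (ks : List Int) (x : Int),
    x ∈ ts.foldl PySem.Set.add ks ↔ x ∈ ks ∨ x ∈ ts := by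
  induction ts with
  | nil => simp
  | cons u ts ih =>
    intro ks x
    simp only [List.foldl_cons, ih, PySem.Set.mem_add, List.mem_cons]
    tauto

/-- The inner loop `for trg_i in trg_is: inverted[trg_i] = F src_i (…)` on a shape dict,
for an arbitrary bucket-update function `F`. -/
theorem innerGen (F : Int → List Int → List Int) (s : Int) : ∀ (ts ks : List Int) (g : Int → List Int),
    ts.foldl (fun d t => d.modify t [] (F s)) (shapeD ks g)
      = shapeD (ts.foldl PySem.Set.add ks)
          (fun t => ((ts.filter (fun u => u == t)).map (fun _ => s)).foldl
            (fun v s' => F s' v) (if t ∈ ks then g t else [])) := by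
  intro ts
  induction ts with
  | nil =>
    intro ks g
    simp only [List.foldl_nil, List.filter_nil, List.map_nil]
    exact (shapeD_congr (fun t ht => by simp [ht])).symm
  | cons u ts ih =>
    intro ks g
    simp only [List.foldl_cons, modify_shapeD]
    rw [ih]
    congr 1
    funext t
    by_cases ht : t = u
    · subst ht
      simp [PySem.Set.mem_add]
    · have hm : t ∈ PySem.Set.add ks u ↔ t ∈ ks := by
        simp [PySem.Set.mem_add, ht]
      by_cases hk : t ∈ ks <;>
        simp [ht, hm, hk, Ne.symm ht]

/-- The outer loop builds, for every target, the fold of `F` over its sources. -/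
theorem outerGen (F : Int → List Int → List Int) :
    ∀ (l : List (Int × List Int)) (ks : List Int) (g : Int → List Int),
    l.foldl (fun d p => p.2.foldl (fun d t => d.modify t [] (F p.1)) d) (shapeD ks g)
      = shapeD (l.foldl (fun s p => p.2.foldl PySem.Set.add s) ks)
          (fun t => (collect l t).foldl (fun v s => F s v) (if t ∈ ks then g t else [])) := by
  intro l
  induction l with
  | nil =>
    intro ks g
    simp only [List.foldl_nil, collect, List.flatMap_nil]
    exact (shapeD_congr (fun t ht => by simp [ht])).symm
  | cons p l ih =>
    intro ks g
    simp only [List.foldl_cons, innerGen]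
    rw [ih]
    congr 1
    funext t
    by_cases h1 : t ∈ p.2.foldl PySem.Set.add ks
    · simp only [if_pos h1, collect, List.flatMap_cons, List.foldl_append]
    · have h2 := (mem_foldl_add p.2 ks t).not.mp h1
      rw [not_or] at h2
      have hk : t ∉ ks := h2.1
      have hfilt : p.2.filter (fun u => u == t) = [] := by
        rw [List.filter_eq_nil_iff]
        intro u hu
        simp only [beq_iff_eq]
        intro he; exact h2.2 (he ▸ hu)
      simp [if_neg hk, collect, List.flatMap_cons, hfilt]

/-- A's second loop sorts every bucket in place. -/
theorem secondA (h : Int → List Int) : ∀ (ts K : List Int) (g : Int → List Int),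
    (∀ t ∈ ts, t ∈ K) →
    (ts.map (fun t => (t, h t))).foldl
        (fun d q => d.insert q.1 (PySem.List.sorted q.2 (fun x => x) false)) (shapeD K g)
      = shapeD K (fun t => if t ∈ ts then PySem.List.sorted (h t) (fun x => x) false else g t) := by
  intro ts
  induction ts with
  | nil => intro K g _; simp
  | cons u ts ih =>
    intro K g hsub
    simp only [List.map_cons, List.foldl_cons]
    rw [insert_shapeD_mem K g _ (hsub u (List.mem_cons_self ..)),
        ih K _ (fun t ht => hsub t (List.mem_cons_of_mem _ ht))]
    congr 1
    funext t
    by_cases h1 : t ∈ ts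
    · simp [h1]
    · by_cases h2 : t = u
      · subst h2; simp [h1]
      · simp [h1, h2]

theorem foldl_append_singleton : ∀ (xs init : List Int),
    xs.foldl (fun v s => v ++ [s]) init = init ++ xs := by
  intro xs
  induction xs with
  | nil => simp
  | cons x xs ih => intro init; simp [ih]

theorem pairwise_getD {l : List Int} (h : l.Pairwise (fun a b => a ≤ b)) :
    ∀ {p q : Nat}, p ≤ q → q < l.length → l.getD p 0 ≤ l.getD q 0 := by
  intro p q hpq hq
  have hp : p < l.length := lt_of_le_of_lt hpq hq
  rw [List.getD_eq_getElem l 0 hp, List.getD_eq_getElem l 0 hq]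
  rcases Nat.lt_or_ge p q with hlt | hge
  · exact List.pairwise_iff_getElem.mp h p q hp hq hlt
  · have : p = q := le_antisymm hpq hge
    subst this; exact le_refl _

/-- Correctness of the binary-search loop on a sorted bucket: every element strictly
before the returned position is ≤ x, every element from it on is > x. -/
theorem pvBisect_spec (bucket : List Int) (x : Int)
    (hs : bucket.Pairwise (fun a b => a ≤ b)) :
    ∀ (n lo hi : Nat), hi - lo ≤ n → lo ≤ hi → hi ≤ bucket.length →
    (∀ j, j < lo → bucket.getD j 0 ≤ x) →
    (∀ j, hi ≤ j → j < bucket.length → x < bucket.getD j 0) →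
    pvBisect bucket x lo hi ≤ bucket.length ∧
    (∀ j, j < pvBisect bucket x lo hi → bucket.getD j 0 ≤ x) ∧
    (∀ j, pvBisect bucket x lo hi ≤ j → j < bucket.length → x < bucket.getD j 0) := by
  intro n
  induction n with
  | zero =>
    intro lo hi hn hlohi hhil hpre hsuf
    have heq : lo = hi := by omega
    subst heq
    have hstep : pvBisect bucket x lo lo = lo := by
      rw [pvBisect, dif_neg (lt_irrefl lo)]
    rw [hstep]
    exact ⟨hhil, hpre, fun j hj hjl => hsuf j hj hjl⟩
  | succ n ih =>
    intro lo hi hn hlohi hhil hpre hsuf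
    by_cases h : lo < hi
    · have hstep : pvBisect bucket x lo hi
          = if bucket.getD ((lo + hi) / 2) 0 ≤ x then pvBisect bucket x ((lo + hi) / 2 + 1) hi
            else pvBisect bucket x lo ((lo + hi) / 2) := by
        rw [pvBisect, dif_pos h]
      rw [hstep]
      have hmlt : (lo + hi) / 2 < hi := by omega
      have hmlen : (lo + hi) / 2 < bucket.length := lt_of_lt_of_le hmlt hhil
      by_cases hc : bucket.getD ((lo + hi) / 2) 0 ≤ x
      · rw [if_pos hc]
        exact ih ((lo + hi) / 2 + 1) hi (by omega) (by omega) hhil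
          (fun j hj => le_trans (pairwise_getD hs (by omega) hmlen) hc) hsuf
      · rw [if_neg hc]
        exact ih lo ((lo + hi) / 2) (by omega) (by omega) (le_of_lt hmlen) hpre
          (fun j hj hjl => lt_of_lt_of_le (not_le.mp hc) (pairwise_getD hs hj hjl))
    · have heq : lo = hi := by omega
      subst heq
      have hstep : pvBisect bucket x lo lo = lo := by
        rw [pvBisect, dif_neg (lt_irrefl lo)]
      rw [hstep]
      exact ⟨hhil, hpre, fun j hj hjl => hsuf j hj hjl⟩

/-- `insertBy (<)` inserts exactly at a position whose prefix is ≤ x and whose boundary is > x. -/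
theorem insertBy_pos (x : Int) : ∀ (bucket : List Int) (r : Nat), r ≤ bucket.length →
    (∀ j, j < r → bucket.getD j 0 ≤ x) →
    (r < bucket.length → x < bucket.getD r 0) →
    PySem.List.insertBy (fun a b => decide (a < b)) x bucket
      = bucket.take r ++ x :: bucket.drop r := by
  intro bucket
  induction bucket with
  | nil =>
    intro r hr _ _
    have : r = 0 := Nat.le_zero.mp hr
    subst this
    simp [PySem.List.insertBy]
  | cons y ys ih =>
    intro r hr hpre hbnd
    cases r with
    | zero =>
      have hy : x < y := by
        have := hbnd (by simp)
        simpa using this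
      simp [PySem.List.insertBy, hy]
    | succ r =>
      have hy : y ≤ x := by
        have := hpre 0 (Nat.succ_pos r)
        simpa using this
      have hylt : ¬ (x < y) := not_lt.mpr hy
      simp only [PySem.List.insertBy, decide_eq_true_eq, if_neg hylt,
        List.take_succ_cons, List.drop_succ_cons, List.cons_append]
      congr 1
      apply ih r (by simpa using hr)
      · intro j hj
        have := hpre (j + 1) (by omega)
        simpa using this
      · intro hlt
        have := hbnd (by simpa using hlt)
        simpa using this

theorem insertBy_pairwise (x : Int) : ∀ (l : List Int), l.Pairwise (fun a b => a ≤ b) →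
    (PySem.List.insertBy (fun a b => decide (a < b)) x l).Pairwise (fun a b => a ≤ b) := by
  intro l
  induction l with
  | nil => intro _; simp [PySem.List.insertBy]
  | cons y ys ih =>
    intro h
    rcases List.pairwise_cons.mp h with ⟨hy, hys⟩
    by_cases hc : x < y
    · simp only [PySem.List.insertBy, decide_eq_true_eq, if_pos hc]
      refine List.pairwise_cons.mpr ⟨?_, h⟩
      intro z hz
      rcases List.mem_cons.mp hz with rfl | hz'
      · exact le_of_lt hc
      · exact le_trans (le_of_lt hc) (hy z hz')
    · simp only [PySem.List.insertBy, decide_eq_true_eq, if_neg hc]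
      refine List.pairwise_cons.mpr ⟨?_, ih hys⟩
      intro z hz
      rcases (PySem.List.mem_insertBy _ x z ys).mp hz with rfl | hz'
      · exact not_lt.mp hc
      · exact hy z hz'

/-- On a sorted bucket, B's binary insertion is `insertBy (<)`. -/
theorem stepB_eq (bucket : List Int) (x : Int)
    (hs : bucket.Pairwise (fun a b => a ≤ b)) :
    PySem.List.insert bucket ((pvBisect bucket x 0 bucket.length : Nat) : Int) x
      = PySem.List.insertBy (fun a b => decide (a < b)) x bucket := by
  obtain ⟨hle, hpre, hsuf⟩ := pvBisect_spec bucket x hs bucket.length 0 bucket.length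
    (by omega) (Nat.zero_le _) (le_refl _) (fun j hj => absurd hj (Nat.not_lt_zero j))
    (fun j hj hjl => absurd hjl (not_lt.mpr hj))
  rw [PySem.List.insert_natCast bucket _ x hle]
  exact (insertBy_pos x bucket _ hle hpre (fun hlt => hsuf _ (le_refl _) hlt)).symm

/-- Folding B's binary insertion from a sorted start is folding `insertBy (<)`. -/
theorem foldl_stepB : ∀ (xs init : List Int), init.Pairwise (fun a b => a ≤ b) →
    xs.foldl (fun v s =>
        PySem.List.insert v ((pvBisect v s 0 v.length : Nat) : Int) s) init
      = xs.foldl (fun acc x => PySem.List.insertBy (fun a b => decide (a < b)) x acc) init := by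
  intro xs
  induction xs with
  | nil => intro init _; rfl
  | cons s xs ih =>
    intro init hinit
    simp only [List.foldl_cons]
    rw [stepB_eq init s hinit]
    exact ih _ (insertBy_pairwise s init hinit)

-- ===== VERDICT (by name: the statement is the Claim_ definition above) =====
theorem invert_alignments_spec : Claim_equal_invert_alignments := by
  intro alignment _
  unfold Spec_invert_alignments invert_alignments invert_alignments_alt
  simp only []
  have hempty : (PySem.Dict.empty : PySem.Dict Int (List Int)) = shapeD [] (fun _ => []) := rfl
  -- A's first loop
  have hA := outerGen (fun s v => v ++ [s]) alignment [] (fun _ => [])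
  have hB := outerGen (fun s v =>
      PySem.List.insert v ((pvBisect v s 0 v.length : Nat) : Int) s) alignment [] (fun _ => [])
  simp only [] at hA hB
  rw [hempty, hA]
  set KA := alignment.foldl (fun s p => p.2.foldl PySem.Set.add s) ([] : List Int) with hKA
  have hgA : (shapeD KA fun t => (collect alignment t).foldl (fun v s => v ++ [s])
      (if t ∈ ([] : List Int) then [] else []))
      = shapeD KA (fun t => collect alignment t) := by
    apply shapeD_congr
    intro t _
    simp only [List.not_mem_nil, if_false]
    rw [foldl_append_singleton, List.nil_append]
  rw [hgA]
  -- A's second loop, over the items of `shapeD KA (collect alignment)`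
  rw [show (shapeD KA (fun t => collect alignment t)).items
      = KA.map (fun t => (t, collect alignment t)) from rfl]
  rw [secondA (fun t => collect alignment t) KA KA (fun t => collect alignment t)
      (fun _ ht => ht)]
  -- B's loop
  conv_rhs => rw [hB]
  simp only [shapeD]
  apply List.map_congr_left
  intro t ht
  simp only [if_pos ht, List.not_mem_nil, if_false]
  congr 1
  rw [foldl_stepB (collect alignment t) [] (List.Pairwise.nil),
    ← PySem.List.sorted_eq_foldl_insertBy (collect alignment t) (fun x => x)]
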